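-- pv_equiv track=rewrite | github.com/the-omega-institute/automath | theory/2026_golden_ratio_driven_scan_projection_generation_recursive_emergence/scripts/exp_fibonacci_cube_toggle_coxeter_audit.py | _orbit_len_from_word
-- ===== SOURCE A (Python) =====
-- from typing import Dict, List
--
-- def _orbit_len_from_word(vertices: List[str], p: List[int], w: str) -> int:
--     idx = {v: j for j, v in enumerate(vertices)}
--     if w not in idx:
--         raise ValueError("witness word not a vertex")
--     s = idx[w]
--     seen = {s: 0}
--     cur = s
--     t = 0
--     while True:
--         t += 1
--         cur = p[cur]
--         if cur in seen:
--             return int(t - seen[cur])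
--         seen[cur] = t
-- ===== SOURCE B (Python) =====
-- def _orbit_len_from_word(vertices, p, w):
--     idx = {v: j for j, v in enumerate(vertices)}
--     if w not in idx:
--         raise ValueError("witness word not a vertex")
--     # Phase 1: advance far enough to be guaranteed inside the eventual cycle.
--     x = idx[w]
--     for _ in range(2 * len(p) + 2):
--         x = p[x]
--     # Phase 2: walk once around the cycle, counting its length.
--     y = p[x]
--     c = 1
--     while y != x:
--         y = p[y]
--         c += 1
--     return c
-- ===== Notes on version B (the rewrite author's own statement) =====
-- stated objective: alternative
-- what changed: A's visited-dictionary walk (hash every node, return t - seen[cur] at the first repeat) is replaced by a two-phase pointer walk: advance 2*len(p)+2 steps to land inside the eventual cycle, then count one lap of the cycle with a single pointer, so no visited dict is maintained.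
-- outside the precondition, e.g. on _orbit_len_from_word(['a', 'b'], [1, 0, 5], 'a'): A returns 2, B returns 2
import Mathlib
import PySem

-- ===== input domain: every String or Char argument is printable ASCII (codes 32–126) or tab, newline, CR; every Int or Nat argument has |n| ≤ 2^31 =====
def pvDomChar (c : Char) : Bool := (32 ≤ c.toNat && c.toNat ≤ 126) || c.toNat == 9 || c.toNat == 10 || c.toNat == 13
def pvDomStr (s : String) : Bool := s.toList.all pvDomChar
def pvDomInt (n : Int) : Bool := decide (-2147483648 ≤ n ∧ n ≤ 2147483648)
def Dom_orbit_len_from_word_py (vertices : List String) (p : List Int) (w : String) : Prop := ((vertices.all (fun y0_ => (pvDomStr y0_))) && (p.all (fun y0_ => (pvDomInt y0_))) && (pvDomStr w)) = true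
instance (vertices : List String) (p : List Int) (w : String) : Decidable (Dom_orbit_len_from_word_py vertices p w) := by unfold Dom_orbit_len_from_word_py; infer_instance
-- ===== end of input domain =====

-- B replaces A's visited-dictionary walk by a two-phase pointer walk (advance far enough to
-- land on the cycle, then count one lap of it); no visited dict is maintained.

-- ===== PORT A =====
-- idx = {v: j for j, v in enumerate(vertices)}   (shared first line of A and B)
def pvIdx (vertices : List String) : PySem.Dict String Int :=
  (PySem.List.enumerate vertices).foldl (fun d jv => d.insert jv.2 jv.1) PySem.Dict.empty

-- the 'while True' loop of A; fuel 2*len(p)+2 always suffices before the first repeat (see proofs);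
-- 0 on fuel exhaustion / IndexError (both unreachable under Pre_)
def pvALoop (p : List Int) : Nat → PySem.Dict Int Int → Int → Int → Int
  | 0, _, _, _ => 0
  | fuel+1, seen, cur, t =>
    match PySem.List.pyGet? p cur with
    | none => 0
    | some cur' =>
      match seen.get? cur' with
      | some i => (t + 1) - i
      | none => pvALoop p fuel (seen.insert cur' (t + 1)) cur' (t + 1)

def orbit_len_from_word_py (vertices : List String) (p : List Int) (w : String) : Int :=
  match (pvIdx vertices).get? w with
  | none => 0      -- ValueError in Python (outside Pre_)
  | some s => pvALoop p (2 * p.length + 2) (PySem.Dict.empty.insert s 0) s 0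

-- ===== PORT B =====
-- phase 1: for _ in range(2*len(p)+2): x = p[x]   (none = IndexError, outside Pre_)
def pvBAdvance (p : List Int) : Nat → Int → Option Int
  | 0, x => some x
  | k+1, x =>
    match PySem.List.pyGet? p x with
    | none => none
    | some x' => pvBAdvance p k x'

-- phase 2: y = p[x]; c = 1; while y != x: y = p[y]; c += 1; return c
def pvBCycle (p : List Int) (x : Int) : Nat → Int → Int → Int
  | 0, _, _ => 0
  | fuel+1, y, c =>
    if y = x then c
    else
      match PySem.List.pyGet? p y with
      | none => 0
      | some y' => pvBCycle p x fuel y' (c + 1)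

def orbit_len_from_word_py_alt (vertices : List String) (p : List Int) (w : String) : Int :=
  match (pvIdx vertices).get? w with
  | none => 0      -- ValueError in Python (outside Pre_)
  | some s =>
    match pvBAdvance p (2 * p.length + 2) s with
    | none => 0
    | some x =>
      match PySem.List.pyGet? p x with
      | none => 0
      | some y => pvBCycle p x (2 * p.length + 2) y 1

-- ===== PRECONDITION & SPEC =====
-- Pre_ requires w to occur in vertices, its (last) index to be a valid index into p, and EVERY
-- entry of p to be an in-range (possibly negative, Python-style) index: A raises ValueError /
-- IndexError outside the first two conditions, and a closed-form precondition cannot trace which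
-- entries the walk actually touches, so the last condition also excludes some inputs with
-- out-of-range entries that the walk never reaches — on those A and B still return the same value.
def Pre_orbit_len_from_word_py (vertices : List String) (p : List Int) (w : String) : Prop :=
  w ∈ vertices ∧
  (∀ j : Nat, j < vertices.length → vertices[j]? = some w → (j : Int) < (p.length : Int)) ∧
  ∀ x ∈ p, -(p.length : Int) ≤ x ∧ x < (p.length : Int)

instance (vertices : List String) (p : List Int) (w : String) : Decidable (Pre_orbit_len_from_word_py vertices p w) := by
  unfold Pre_orbit_len_from_word_py; infer_instance

def pvWitness_orbit_len_from_word_py : List String × List Int × String := (["a", "b", "c"], [2, 0, 1], "b")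

def Spec_orbit_len_from_word_py (vertices : List String) (p : List Int) (w : String) (out : Int) : Prop := out = orbit_len_from_word_py_alt vertices p w
instance (vertices : List String) (p : List Int) (w : String) (out : Int) : Decidable (Spec_orbit_len_from_word_py vertices p w out) := by unfold Spec_orbit_len_from_word_py; infer_instance

-- ===== CLAIM (what is proved, stated in full; the proofs are below) =====
def Claim_equal_orbit_len_from_word_py : Prop := ∀ (vertices : List String) (p : List Int) (w : String), Dom_orbit_len_from_word_py vertices p w → Pre_orbit_len_from_word_py vertices p w → Spec_orbit_len_from_word_py vertices p w (orbit_len_from_word_py vertices p w)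

-- ===== LEMMAS AND PROOFS =====

-- the deterministic trajectory s, p[s], p[p[s]], …
def pvSeq (p : List Int) (s : Int) : Nat → Int
  | 0 => s
  | t+1 => (PySem.List.pyGet? p (pvSeq p s t)).getD 0

-- the dict 'seen' of A after t loop iterations
def pvSeen (p : List Int) (s : Int) (t : Nat) : PySem.Dict Int Int :=
  (List.range (t+1)).foldl (fun d j => d.insert (pvSeq p s j) (j : Int)) PySem.Dict.empty

-- keys never touched by the idx fold keep their old binding
theorem pvIdx_get_notmem (vs : List String) (w : String) (d : PySem.Dict String Int) (s0 : Int)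
    (hw : w ∉ vs) :
    ((PySem.List.enumerate vs s0).foldl (fun d jv => d.insert jv.2 jv.1) d).get? w = d.get? w := by
  induction vs generalizing d s0 with
  | nil => simp [PySem.List.enumerate_nil]
  | cons v rest ih =>
    rw [PySem.List.enumerate_cons]
    simp only [List.foldl_cons]
    rw [ih _ _ (by simp_all), PySem.Dict.get?_insert]
    simp only [List.mem_cons, not_or] at hw
    simp [hw.1]

-- if w occurs in vs, the idx dict maps w to s0 + (index of some occurrence of w)
theorem pvIdx_get_mem (vs : List String) (w : String) (d : PySem.Dict String Int) (s0 : Int)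
    (hw : w ∈ vs) :
    ∃ k : Nat, k < vs.length ∧ vs[k]? = some w ∧
      ((PySem.List.enumerate vs s0).foldl (fun d jv => d.insert jv.2 jv.1) d).get? w = some (s0 + k) := by
  induction vs generalizing d s0 with
  | nil => simp at hw
  | cons v rest ih =>
    rw [PySem.List.enumerate_cons]
    simp only [List.foldl_cons]
    by_cases hr : w ∈ rest
    · obtain ⟨k, hk, hkw, hget⟩ := ih (d.insert v s0) (s0 + 1) hr
      refine ⟨k + 1, by simpa using hk, by simpa using hkw, ?_⟩
      rw [hget]; congr 1; push_cast; ring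
    · have hwv : w = v := by
        rcases List.mem_cons.mp hw with h | h
        · exact h
        · exact absurd h hr
      refine ⟨0, by simp, by simp [hwv], ?_⟩
      rw [pvIdx_get_notmem rest w _ _ hr, hwv, PySem.Dict.get?_insert_self]
      simp

-- every trajectory point is an in-range Python index
theorem pvSeq_valid (p : List Int) (s : Int)
    (hp : ∀ x ∈ p, -(p.length : Int) ≤ x ∧ x < (p.length : Int))
    (hs0 : 0 ≤ s) (hs1 : s < (p.length : Int)) :
    ∀ t, -(p.length : Int) ≤ pvSeq p s t ∧ pvSeq p s t < (p.length : Int) := by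
  intro t
  induction t with
  | zero => exact ⟨by simp [pvSeq]; omega, by simpa [pvSeq] using hs1⟩
  | succ t ih =>
    have hr : PySem.Raise.InRange p.length (pvSeq p s t) := ih
    cases hx : PySem.List.pyGet? p (pvSeq p s t) with
    | none => exact absurd ((PySem.List.pyGet?_eq_none_iff p _).mp hx) (not_not_intro hr)
    | some x =>
      have hm : x ∈ p := PySem.List.mem_of_pyGet?_eq_some p hx
      have := hp x hm
      simp [pvSeq, hx]
      omega

theorem pvSeq_step (p : List Int) (s : Int)
    (hp : ∀ x ∈ p, -(p.length : Int) ≤ x ∧ x < (p.length : Int))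
    (hs0 : 0 ≤ s) (hs1 : s < (p.length : Int)) :
    ∀ t, PySem.List.pyGet? p (pvSeq p s t) = some (pvSeq p s (t+1)) := by
  intro t
  have hr : PySem.Raise.InRange p.length (pvSeq p s t) := pvSeq_valid p s hp hs0 hs1 t
  cases hx : PySem.List.pyGet? p (pvSeq p s t) with
  | none => exact absurd ((PySem.List.pyGet?_eq_none_iff p _).mp hx) (not_not_intro hr)
  | some x => simp [pvSeq, hx]

-- the trajectory repeats within the first len(p)+1 steps
theorem pvSeq_repeat (p : List Int) (s : Int)
    (hp : ∀ x ∈ p, -(p.length : Int) ≤ x ∧ x < (p.length : Int))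
    (hs0 : 0 ≤ s) (hs1 : s < (p.length : Int)) :
    ∃ i j, i < j ∧ j ≤ p.length + 1 ∧ pvSeq p s i = pvSeq p s j := by
  have hmem : ∀ t : Nat, pvSeq p s (t+1) ∈ p := by
    intro t
    exact PySem.List.mem_of_pyGet?_eq_some p (pvSeq_step p s hp hs0 hs1 t)
  have hcard : (p.toFinset).card < (Finset.range (p.length + 1)).card := by
    have := p.toFinset_card_le
    simp; omega
  obtain ⟨i, hi, j, hj, hne, hfe⟩ :=
    Finset.exists_ne_map_eq_of_card_lt_of_maps_to hcard
      (f := fun i => pvSeq p s (i+1)) (fun i _ => List.mem_toFinset.mpr (hmem i))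
  simp only [Finset.mem_range] at hi hj
  rcases Nat.lt_or_ge i j with h | h
  · exact ⟨i+1, j+1, by omega, by omega, hfe⟩
  · exact ⟨j+1, i+1, by omega, by omega, hfe.symm⟩

theorem pvSeq_shift (p : List Int) (s : Int) {x y : Nat} (h : pvSeq p s x = pvSeq p s y) :
    ∀ d, pvSeq p s (x + d) = pvSeq p s (y + d) := by
  intro d
  induction d with
  | zero => simpa using h
  | succ d ih => rw [← Nat.add_assoc, ← Nat.add_assoc, pvSeq, pvSeq, ih]

-- eventual periodicity with period T - i0
theorem pvSeq_per (p : List Int) (s : Int) (T i0 : Nat) (hi0T : i0 < T)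
    (hEq : pvSeq p s i0 = pvSeq p s T) :
    ∀ m, i0 ≤ m → pvSeq p s (m + (T - i0)) = pvSeq p s m := by
  intro m hm
  have h1 : m + (T - i0) = T + (m - i0) := by omega
  have h2 : m = i0 + (m - i0) := by omega
  rw [h1, pvSeq_shift p s hEq.symm (m - i0), ← h2]

-- normal form of a trajectory point in the periodic part
theorem pvSeq_norm (p : List Int) (s : Int) (T i0 : Nat) (hi0T : i0 < T)
    (hEq : pvSeq p s i0 = pvSeq p s T) :
    ∀ m, i0 ≤ m → pvSeq p s m = pvSeq p s (i0 + (m - i0) % (T - i0)) := by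
  intro m
  induction m using Nat.strong_induction_on with
  | _ m ih =>
    intro hm
    by_cases hlt : m - i0 < T - i0
    · rw [Nat.mod_eq_of_lt hlt]
      congr 1; omega
    · have hTi : 0 < T - i0 := by omega
      have hm' : i0 ≤ m - (T - i0) := by omega
      have hper := pvSeq_per p s T i0 hi0T hEq (m - (T - i0)) hm'
      have hidx : m - (T - i0) + (T - i0) = m := by omega
      rw [hidx] at hper
      rw [hper, ih (m - (T - i0)) (by omega) hm']
      congr 2
      conv_rhs => rw [Nat.mod_eq_sub_mod (by omega : T - i0 ≤ m - i0)]
      congr 1; omega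

theorem pvSeen_succ (p : List Int) (s : Int) (t : Nat) :
    pvSeen p s (t+1) = (pvSeen p s t).insert (pvSeq p s (t+1)) ((t+1 : Nat) : Int) := by
  unfold pvSeen
  rw [List.range_succ, List.foldl_append]
  simp

theorem pvSeen_get_idx (p : List Int) (s : Int) (T : Nat)
    (hmin : ∀ t, t < T → ∀ i, i < t → pvSeq p s i ≠ pvSeq p s t)
    (t : Nat) (ht : t < T) : ∀ j, j ≤ t → (pvSeen p s t).get? (pvSeq p s j) = some (j : Int) := by
  induction t with
  | zero =>
    intro j hj
    interval_cases j
    show ((PySem.Dict.empty).insert (pvSeq p s 0) ((0:Nat) : Int)).get? (pvSeq p s 0) = _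
    · simp [PySem.Dict.get?_insert_self]
  | succ t iht =>
    intro j hj
    rw [pvSeen_succ, PySem.Dict.get?_insert]
    rcases Nat.lt_or_ge j (t+1) with hjt | hjt
    · have hne : pvSeq p s j ≠ pvSeq p s (t+1) := hmin (t+1) ht j hjt
      rw [if_neg hne]
      exact iht (by omega) j (by omega)
    · have hj1 : j = t + 1 := by omega
      subst hj1
      simp

theorem pvSeen_get_none (p : List Int) (s : Int) (t : Nat) (v : Int)
    (hv : ∀ j, j ≤ t → pvSeq p s j ≠ v) : (pvSeen p s t).get? v = none := by
  induction t with
  | zero =>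
    have h0 := hv 0 le_rfl
    simp [pvSeen, List.range_one, PySem.Dict.get?_insert]
    exact fun h => h0 h.symm
  | succ t iht =>
    rw [pvSeen_succ, PySem.Dict.get?_insert]
    have hne : v ≠ pvSeq p s (t+1) := fun h => hv (t+1) le_rfl h.symm
    rw [if_neg hne]
    exact iht (fun j hj => hv j (by omega))

-- A's loop returns the period T - i0
theorem pvALoop_eq (p : List Int) (s : Int) (T i0 : Nat)
    (hstep : ∀ t, PySem.List.pyGet? p (pvSeq p s t) = some (pvSeq p s (t+1)))
    (hmin : ∀ t, t < T → ∀ i, i < t → pvSeq p s i ≠ pvSeq p s t)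
    (hi0T : i0 < T) (hEq : pvSeq p s i0 = pvSeq p s T) :
    ∀ fuel t, t < T → T ≤ t + fuel →
      pvALoop p fuel (pvSeen p s t) (pvSeq p s t) (t : Int) = (T : Int) - (i0 : Int) := by
  intro fuel
  induction fuel with
  | zero => intro t ht hle; omega
  | succ fuel ih =>
    intro t ht hle
    rcases Nat.lt_or_ge (t+1) T with hlt | hge
    · -- not yet at the first repeat: the dict lookup misses
      have hnone : (pvSeen p s t).get? (pvSeq p s (t+1)) = none := by
        apply pvSeen_get_none
        intro j hj
        exact hmin (t+1) hlt j (by omega)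
      simp only [pvALoop, hstep t, hnone]
      have hrec := ih (t+1) hlt (by omega)
      rw [pvSeen_succ] at hrec
      have hc : ((t : Int) + 1) = ((t+1 : Nat) : Int) := by push_cast; ring
      rw [hc]
      exact hrec
    · -- t+1 = T: the repeat is found, seen[a T] = i0
      have hT : T = t + 1 := by omega
      have hsome : (pvSeen p s t).get? (pvSeq p s (t+1)) = some (i0 : Int) := by
        have := pvSeen_get_idx p s T hmin t ht i0 (by omega)
        rw [← hT, ← hEq] at *
        exact this
      simp only [pvALoop, hstep t, hsome]
      have : ((t : Int) + 1) = (T : Int) := by rw [hT]; push_cast; ring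
      omega

theorem pvBAdvance_eq (p : List Int) (s : Int)
    (hstep : ∀ t, PySem.List.pyGet? p (pvSeq p s t) = some (pvSeq p s (t+1))) :
    ∀ k t, pvBAdvance p k (pvSeq p s t) = some (pvSeq p s (t + k)) := by
  intro k
  induction k with
  | zero => intro t; simp [pvBAdvance]
  | succ k ih =>
    intro t
    rw [pvBAdvance]
    simp only [hstep t]
    rw [ih (t+1)]
    congr 2
    omega

-- B's second phase counts exactly one lap of the cycle
theorem pvBCycle_eq (p : List Int) (s : Int) (T i0 M : Nat)
    (hstep : ∀ t, PySem.List.pyGet? p (pvSeq p s t) = some (pvSeq p s (t+1)))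
    (hmin : ∀ t, t < T → ∀ i, i < t → pvSeq p s i ≠ pvSeq p s t)
    (hi0T : i0 < T) (hEq : pvSeq p s i0 = pvSeq p s T) (hTM : T ≤ M) :
    ∀ fuel c, 1 ≤ c → c ≤ T - i0 →
      (∀ d, 1 ≤ d → d < c → pvSeq p s (M + d) ≠ pvSeq p s M) →
      (T - i0) - c < fuel →
      pvBCycle p (pvSeq p s M) fuel (pvSeq p s (M + c)) (c : Int) = (T : Int) - (i0 : Int) := by
  intro fuel
  have hMi0 : i0 ≤ M := by omega
  have hper := pvSeq_per p s T i0 hi0T hEq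
  induction fuel with
  | zero => intro c hc1 hcle hinv hfuel; omega
  | succ fuel ih =>
    intro c hc1 hcle hinv hfuel
    rw [pvBCycle]
    by_cases heq : pvSeq p s (M + c) = pvSeq p s M
    · -- the lap closed: c must be exactly the period T - i0
      rw [if_pos heq]
      -- from a (M+c) = a M derive (T - i0) ∣ c via the normal form
      have hn1 := pvSeq_norm p s T i0 hi0T hEq (M + c) (by omega)
      have hn2 := pvSeq_norm p s T i0 hi0T hEq M (by omega)
      rw [hn1, hn2] at heq
      have hidx : i0 + (M + c - i0) % (T - i0) = i0 + (M - i0) % (T - i0) := by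
        by_contra hne
        have hb1 : (M + c - i0) % (T - i0) < T - i0 := Nat.mod_lt _ (by omega)
        have hb2 : (M - i0) % (T - i0) < T - i0 := Nat.mod_lt _ (by omega)
        rcases Nat.lt_or_ge (i0 + (M + c - i0) % (T - i0)) (i0 + (M - i0) % (T - i0)) with h | h
        · exact hmin _ (by omega) _ h heq
        · exact hmin _ (by omega) _ (by omega) heq.symm
      have h' : M + c - i0 = M - i0 + c := by omega
      rw [h'] at hidx
      have hmod : (M - i0 + c) % (T - i0) = (M - i0 + 0) % (T - i0) := by
        simpa using Nat.add_left_cancel hidx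
      have hdvd : (T - i0) ∣ c := by
        have := (Nat.ModEq.add_left_cancel' (M - i0) (hmod : Nat.ModEq (T - i0) (M - i0 + c) (M - i0 + 0)))
        exact (Nat.modEq_zero_iff_dvd).mp this
      have hc : c = T - i0 := Nat.le_antisymm hcle (Nat.le_of_dvd (by omega) hdvd)
      rw [hc]
      push_cast [Nat.cast_sub (by omega : i0 ≤ T)]
      ring
    · -- lap not closed yet: c < T - i0, take one more step
      rw [if_neg heq]
      have hclt : c < T - i0 := by
        rcases Nat.lt_or_ge c (T - i0) with h | h
        · exact h
        · have hc : c = T - i0 := by omega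
          rw [hc] at heq
          exact absurd (hper M (by omega)) heq
      simp only [hstep (M + c)]
      have := ih (c+1) (by omega) (by omega)
        (fun d hd1 hd2 => by
          rcases Nat.lt_or_ge d c with h | h
          · exact hinv d hd1 h
          · have : d = c := by omega
            rwa [this])
        (by omega)
      rw [← Nat.add_assoc] at this
      have hcast : (c : Int) + 1 = ((c+1 : Nat) : Int) := by push_cast; ring
      rw [hcast]
      exact this

theorem pvWitness_ok :
    Dom_orbit_len_from_word_py pvWitness_orbit_len_from_word_py.1 pvWitness_orbit_len_from_word_py.2.1 pvWitness_orbit_len_from_word_py.2.2 ∧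
    Pre_orbit_len_from_word_py pvWitness_orbit_len_from_word_py.1 pvWitness_orbit_len_from_word_py.2.1 pvWitness_orbit_len_from_word_py.2.2 := by
  decide

-- ===== VERDICT (by name: the statement is the Claim_ definition above) =====
theorem orbit_len_from_word_py_spec : Claim_equal_orbit_len_from_word_py := by
  intro vertices p w _hDom hPre
  obtain ⟨hw, hbd, hp⟩ := hPre
  unfold Spec_orbit_len_from_word_py
  obtain ⟨k, hk, hkw, hget⟩ := pvIdx_get_mem vertices w PySem.Dict.empty 0 hw
  simp only [zero_add] at hget
  have hget' : (pvIdx vertices).get? w = some ((k : Nat) : Int) := hget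
  have hs0 : (0 : Int) ≤ (k : Int) := by positivity
  have hs1 : ((k : Nat) : Int) < (p.length : Int) := hbd k hk hkw
  set st : Int := ((k : Nat) : Int) with hst
  simp only [orbit_len_from_word_py, orbit_len_from_word_py_alt, hget']
  -- trajectory facts
  have hstep := pvSeq_step p st hp hs0 hs1
  obtain ⟨i, j, hij, hjle, hije⟩ := pvSeq_repeat p st hp hs0 hs1
  have hPex : ∃ t, ∃ i2 < t, pvSeq p st i2 = pvSeq p st t := ⟨j, i, hij, hije⟩
  haveI : DecidablePred fun t => ∃ i2 < t, pvSeq p st i2 = pvSeq p st t :=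
    Classical.decPred _
  obtain ⟨i0, hi0T, hEq⟩ := Nat.find_spec hPex
  set T := Nat.find hPex with hT
  have hmin : ∀ t, t < T → ∀ i2, i2 < t → pvSeq p st i2 ≠ pvSeq p st t := by
    intro t ht i2 hi2 he
    exact Nat.find_min hPex ht ⟨i2, hi2, he⟩
  have hTle : T ≤ p.length + 1 := le_trans (Nat.find_min' hPex ⟨i, hij, hije⟩) hjle
  -- A's loop
  have h0 : PySem.Dict.empty.insert st 0 = pvSeen p st 0 := by
    show PySem.Dict.empty.insert st 0 = (List.range 1).foldl _ PySem.Dict.empty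
    simp [List.range_one]
    rfl
  have hA : pvALoop p (2 * p.length + 2) (PySem.Dict.empty.insert st 0) st 0
      = (T : Int) - (i0 : Int) := by
    rw [h0]
    have := pvALoop_eq p st T i0 hstep hmin hi0T hEq (2 * p.length + 2) 0 (by omega) (by omega)
    simpa using this
  -- B's two phases
  have hadv := pvBAdvance_eq p st hstep (2 * p.length + 2) 0
  simp only [Nat.zero_add] at hadv
  have hadv' : pvBAdvance p (2 * p.length + 2) st = some (pvSeq p st (2 * p.length + 2)) := hadv
  rw [hA, hadv']
  simp only [hstep (2 * p.length + 2)]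
  have hB := pvBCycle_eq p st T i0 (2 * p.length + 2) hstep hmin hi0T hEq (by omega)
      (2 * p.length + 2) 1 le_rfl (by omega) (fun d hd1 hd2 => absurd hd2 (by omega)) (by omega)
  simpa using hB.symm
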